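-- pv_equiv track=rewrite | github.com/janu6ram/CP-Problems | 05-canqueenattack-Python/canqueenattack.py | left_down
-- ===== SOURCE A (Python) =====
-- def left_down(qr, qc, r, c):
--     row = qr
--     col = qc
--     while col != 9:
--         if row == r and col == c:
--             return True
--         row -= 1
--         col += 1
--     return False
-- ===== SOURCE B (Python) =====
-- def left_down(qr, qc, r, c):
--     d = c - qc
--     return qr - r == d and d >= 0 and c <= 8
-- ===== Notes on version B (the rewrite author's own statement) =====
-- stated objective: simpler
-- what changed: Replaces the step-by-step diagonal walk with a single closed-form boolean test (on-diagonal equation plus the column range qc <= c <= 8).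
-- outside the precondition, e.g. on left_down(5, 10, 3, 12): A returns True, B returns False
import Mathlib
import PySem

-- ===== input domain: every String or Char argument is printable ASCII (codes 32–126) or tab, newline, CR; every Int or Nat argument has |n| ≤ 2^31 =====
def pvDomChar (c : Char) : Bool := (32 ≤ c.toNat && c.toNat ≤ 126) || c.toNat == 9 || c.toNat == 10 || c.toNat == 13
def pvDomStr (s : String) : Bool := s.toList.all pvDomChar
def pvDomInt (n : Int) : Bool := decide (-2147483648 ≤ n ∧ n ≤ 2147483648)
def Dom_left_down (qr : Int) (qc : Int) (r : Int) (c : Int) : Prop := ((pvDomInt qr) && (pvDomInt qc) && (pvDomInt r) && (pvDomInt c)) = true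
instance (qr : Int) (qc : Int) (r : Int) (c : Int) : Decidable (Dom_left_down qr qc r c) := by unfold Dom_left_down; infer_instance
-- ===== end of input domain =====

-- B replaces A's stepping loop along the down-left diagonal by one closed-form boolean test (simpler).


-- ===== PORT A =====
-- while col != 9: … — ported with a fuel counter; fuel ((9-qc).toNat + 1) suffices for every qc ≤ 9
def leftDownLoop (r c : Int) : Int → Int → Nat → Bool
  | _, _, 0 => false
  | row, col, fuel + 1 =>
    if col = 9 then false
    else if row = r ∧ col = c then true
    else leftDownLoop r c (row - 1) (col + 1) fuel

def left_down (qr : Int) (qc : Int) (r : Int) (c : Int) : Bool :=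
  leftDownLoop r c qr qc ((9 - qc).toNat + 1)

-- ===== PORT B =====
def left_down_alt (qr : Int) (qc : Int) (r : Int) (c : Int) : Bool :=
  qr - r = c - qc ∧ c - qc ≥ 0 ∧ c ≤ 8

-- ===== PRECONDITION & SPEC =====
-- Pre_ excludes qc > 9, where A's loop starts past column 9 and diverges (except on the ray's
-- own squares, where it accidentally returns True while walking off the board forever otherwise).
def Pre_left_down (qr : Int) (qc : Int) (r : Int) (c : Int) : Prop := qc ≤ 9
instance (qr : Int) (qc : Int) (r : Int) (c : Int) : Decidable (Pre_left_down qr qc r c) := by unfold Pre_left_down; infer_instance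
def pvWitness_left_down : Int × Int × Int × Int := (7, 4, 5, 6)

def Spec_left_down (qr : Int) (qc : Int) (r : Int) (c : Int) (out : Bool) : Prop := out = left_down_alt qr qc r c
instance (qr : Int) (qc : Int) (r : Int) (c : Int) (out : Bool) : Decidable (Spec_left_down qr qc r c out) := by unfold Spec_left_down; infer_instance

-- ===== CLAIM (what is proved, stated in full; the proofs are below) =====
def Claim_equal_left_down : Prop := ∀ (qr : Int) (qc : Int) (r : Int) (c : Int), Dom_left_down qr qc r c → Pre_left_down qr qc r c → Spec_left_down qr qc r c (left_down qr qc r c)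

-- ===== LEMMAS AND PROOFS =====
theorem leftDownLoop_closed (r c : Int) : ∀ (n : Nat) (row col : Int), col ≤ 9 → (9 - col).toNat = n →
    leftDownLoop r c row col (n + 1) = decide (row - r = c - col ∧ c - col ≥ 0 ∧ c ≤ 8) := by
  intro n
  induction n with
  | zero =>
    intro row col hle h0
    have : col = 9 := by omega
    subst this
    simp [leftDownLoop]
    omega
  | succ k ih =>
    intro row col hle hk
    have hc9 : col ≠ 9 := by omega
    rw [show k + 1 + 1 = (k + 1) + 1 from rfl]
    rw [leftDownLoop]
    simp only [if_neg hc9]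
    by_cases hrc : row = r ∧ col = c
    · rw [if_pos hrc]
      have hp : row - r = c - col ∧ c - col ≥ 0 ∧ c ≤ 8 := by
        obtain ⟨h1, h2⟩ := hrc
        exact ⟨by omega, by omega, by omega⟩
      exact (decide_eq_true hp).symm
    · rw [if_neg hrc]
      rw [ih (row - 1) (col + 1) (by omega) (by omega)]
      rw [decide_eq_decide]
      constructor
      · rintro ⟨ha, hb, hc⟩
        have : col ≠ c := fun h => hrc ⟨by omega, h⟩
        exact ⟨by omega, by omega, hc⟩
      · rintro ⟨ha, hb, hc⟩
        exact ⟨by omega, by omega, hc⟩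

-- ===== VERDICT (by name: the statement is the Claim_ definition above) =====
theorem left_down_spec : Claim_equal_left_down := by
  intro qr qc r c _ hpre
  unfold Spec_left_down left_down left_down_alt
  rw [leftDownLoop_closed r c (9 - qc).toNat qr qc hpre rfl]
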